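-- pv_equiv track=rewrite | github.com/hahyeyoung/python | Programmers/level0/문자열 정렬하기(1).py | solution
-- ===== SOURCE A (Python) =====
-- def solution(my_string):
--     answer = []
--     word = list(my_string)
--     for i in word:
--         if i in ['0','1','2','3','4','5','6','7','8','9'] :
--                 answer.append(int(i))
--     answer.sort()
--     return answer
-- ===== SOURCE B (Python) =====
-- def solution(my_string):
--     # Counting sort over the 10 digit values: one pass to tally, then emit in order.
--     counts = [0] * 10
--     for c in my_string:
--         if c.isdigit():
--             counts[ord(c) - 48] += 1
--     return [d for d in range(10) for _ in range(counts[d])]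
-- ===== Notes on version B (the rewrite author's own statement) =====
-- stated objective: faster
-- what changed: Replaces collect-then-comparison-sort with a counting sort: one pass tallies the 10 digit values and the sorted result is emitted directly from the tallies.
import Mathlib
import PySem

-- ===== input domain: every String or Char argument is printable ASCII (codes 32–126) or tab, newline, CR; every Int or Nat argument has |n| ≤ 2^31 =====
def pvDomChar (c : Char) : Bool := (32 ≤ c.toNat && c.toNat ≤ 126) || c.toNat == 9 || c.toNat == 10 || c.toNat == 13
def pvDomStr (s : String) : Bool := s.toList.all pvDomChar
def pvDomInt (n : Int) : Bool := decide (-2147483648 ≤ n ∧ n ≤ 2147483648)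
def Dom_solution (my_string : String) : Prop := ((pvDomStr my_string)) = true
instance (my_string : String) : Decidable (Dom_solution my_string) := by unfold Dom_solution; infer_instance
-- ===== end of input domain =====

-- B replaces A's collect-then-sort with a one-pass counting sort over the 10 digit values (asymptotically faster).


-- ===== PORT A =====
-- int(i) on a single char that the guard has established to be '0'..'9' is exactly ord(i) - 48.
def solution (my_string : String) : List Int :=
  let word := my_string.toList
  let answer := word.foldl
    (fun acc i =>
      if i ∈ ['0','1','2','3','4','5','6','7','8','9'] then acc ++ [((i.toNat : Int) - 48)]
      else acc) []
  PySem.List.sorted answer (fun x => x) false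

-- ===== PORT B =====
-- counts[ord(c)-48] += 1 is List.set at that index; the final comprehension is flatMap of replicates.
def solution_alt (my_string : String) : List Int :=
  let counts := my_string.toList.foldl
    (fun cnt c =>
      if PySem.Chars.isdigit c then cnt.set (c.toNat - 48) (cnt.getD (c.toNat - 48) 0 + 1)
      else cnt)
    (List.replicate 10 (0 : Nat))
  (List.range 10).flatMap (fun d => List.replicate (counts.getD d 0) (d : Int))

-- ===== PRECONDITION & SPEC =====
def Spec_solution (my_string : String) (out : List Int) : Prop := out = solution_alt my_string
instance (my_string : String) (out : List Int) : Decidable (Spec_solution my_string out) := by unfold Spec_solution; infer_instance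

-- ===== CLAIM (what is proved, stated in full; the proofs are below) =====
def Claim_equal_solution : Prop := ∀ (my_string : String), Dom_solution my_string → Spec_solution my_string (solution my_string)

-- ===== LEMMAS AND PROOFS =====

theorem isdigit_iff (c : Char) : PySem.Chars.isdigit c = true ↔ 48 ≤ c.toNat ∧ c.toNat ≤ 57 := by
  simp only [PySem.Chars.isdigit, Bool.and_eq_true, decide_eq_true_eq, Char.le_def,
    UInt32.le_iff_toNat_le, show ('0').val.toNat = 48 from rfl, show ('9').val.toNat = 57 from rfl]
  rfl

theorem mem_digits_iff (c : Char) :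
    (c ∈ ['0','1','2','3','4','5','6','7','8','9']) ↔ PySem.Chars.isdigit c = true := by
  simp only [PySem.Chars.isdigit, List.mem_cons, List.not_mem_nil, or_false,
    Bool.and_eq_true, decide_eq_true_eq, Char.le_def, Char.ext_iff, UInt32.ext_iff,
    UInt32.le_iff_toNat_le,
    show ('0').val.toNat = 48 from rfl, show ('1').val.toNat = 49 from rfl,
    show ('2').val.toNat = 50 from rfl, show ('3').val.toNat = 51 from rfl,
    show ('4').val.toNat = 52 from rfl, show ('5').val.toNat = 53 from rfl,
    show ('6').val.toNat = 54 from rfl, show ('7').val.toNat = 55 from rfl,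
    show ('8').val.toNat = 56 from rfl, show ('9').val.toNat = 57 from rfl]
  omega

theorem char_pred_eq (v : Int) (h0 : 0 ≤ v) (h9 : v ≤ 9) (c : Char) :
    ((((c.toNat : Int) - 48) == v) && decide (c ∈ ['0','1','2','3','4','5','6','7','8','9']))
    = (c.toNat == v.toNat + 48) := by
  have hm : (c ∈ ['0','1','2','3','4','5','6','7','8','9']) ↔ (48 ≤ c.toNat ∧ c.toNat ≤ 57) :=
    (mem_digits_iff c).trans (isdigit_iff c)
  by_cases hc : 48 ≤ c.toNat ∧ c.toNat ≤ 57
  · rw [decide_eq_true (hm.2 hc), Bool.and_true, Bool.eq_iff_iff]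
    simp only [beq_iff_eq]
    omega
  · have hr : (c.toNat == v.toNat + 48) = false := by
      simp only [beq_eq_false_iff_ne, ne_eq]
      omega
    rw [hr, decide_eq_false (fun h => hc (hm.1 h)), Bool.and_false]

theorem char_pred_false (v : Int) (hv : ¬ (0 ≤ v ∧ v ≤ 9)) (c : Char) :
    ((((c.toNat : Int) - 48) == v) && decide (c ∈ ['0','1','2','3','4','5','6','7','8','9'])) = false := by
  have hm : (c ∈ ['0','1','2','3','4','5','6','7','8','9']) ↔ (48 ≤ c.toNat ∧ c.toNat ≤ 57) :=
    (mem_digits_iff c).trans (isdigit_iff c)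
  by_cases hc : 48 ≤ c.toNat ∧ c.toNat ≤ 57
  · rw [decide_eq_true (hm.2 hc), Bool.and_true]
    simp only [beq_eq_false_iff_ne, ne_eq]
    omega
  · rw [decide_eq_false (fun h => hc (hm.1 h)), Bool.and_false]

theorem counts_getD (cs : List Char) : ∀ (cnt : List Nat), cnt.length = 10 → ∀ d, d < 10 →
    (cs.foldl (fun cnt c =>
      if PySem.Chars.isdigit c then cnt.set (c.toNat - 48) (cnt.getD (c.toNat - 48) 0 + 1)
      else cnt) cnt).getD d 0
    = cnt.getD d 0 + cs.countP (fun c => c.toNat == d + 48) := by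
  induction cs with
  | nil => simp
  | cons c cs ih =>
    intro cnt h d hd
    simp only [List.foldl_cons, List.countP_cons]
    by_cases hdig : PySem.Chars.isdigit c = true
    · obtain ⟨h1, h2⟩ := (isdigit_iff c).1 hdig
      rw [if_pos hdig, ih _ (by simp [h]) d hd]
      by_cases he : c.toNat - 48 = d
      · have hb : (c.toNat == d + 48) = true := by simp; omega
        rw [hb, he]
        have hlt : d < cnt.length := by omega
        rw [show (cnt.set d (cnt.getD d 0 + 1)).getD d 0 = cnt.getD d 0 + 1 from by
          simp [List.getD_eq_getElem?_getD, hlt]]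
        simp
        omega
      · have hb : (c.toNat == d + 48) = false := by simp; omega
        rw [hb]
        rw [show (cnt.set (c.toNat - 48) (cnt.getD (c.toNat - 48) 0 + 1)).getD d 0 = cnt.getD d 0 from by
          simp [List.getD_eq_getElem?_getD, List.getElem?_set_ne he]]
        simp
    · rw [if_neg hdig, ih _ h d hd]
      have hb : (c.toNat == d + 48) = false := by
        have := (isdigit_iff c).not.1 (by simp [hdig])
        simp at this ⊢; omega
      rw [hb]
      simp

theorem b_perm_a (cs : List Char) :
    ((List.range 10).flatMap (fun d =>
        List.replicate ((cs.foldl (fun cnt c =>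
          if PySem.Chars.isdigit c then cnt.set (c.toNat - 48) (cnt.getD (c.toNat - 48) 0 + 1)
          else cnt) (List.replicate 10 (0 : Nat))).getD d 0) (d : Int))).Perm
      ((cs.filter (fun i => decide (i ∈ ['0','1','2','3','4','5','6','7','8','9']))).map
        (fun i => ((i.toNat : Int) - 48))) := by
  rw [List.perm_iff_count]
  intro v
  have hK : ∀ d, d < 10 → (cs.foldl (fun cnt c =>
      if PySem.Chars.isdigit c then cnt.set (c.toNat - 48) (cnt.getD (c.toNat - 48) 0 + 1)
      else cnt) (List.replicate 10 (0 : Nat))).getD d 0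
      = cs.countP (fun c => c.toNat == d + 48) := by
    intro d hd
    rw [counts_getD cs (List.replicate 10 (0 : Nat)) (by simp) d hd]
    have hz : (List.replicate 10 (0 : Nat)).getD d 0 = 0 := by
      interval_cases d <;> rfl
    rw [hz, Nat.zero_add]
  rw [show List.range 10 = [0,1,2,3,4,5,6,7,8,9] from rfl]
  simp only [List.flatMap_cons, List.flatMap_nil, List.append_nil, List.count_append,
    List.count_replicate]
  rw [List.count_eq_countP, List.countP_map, List.countP_filter]
  by_cases hv : 0 ≤ v ∧ v ≤ 9
  · obtain ⟨h0, h9⟩ := hv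
    have hP : (cs.countP fun c =>
        ((fun x => x == v) ∘ fun i => ((i.toNat : Int) - 48)) c
          && decide (c ∈ ['0','1','2','3','4','5','6','7','8','9']))
        = cs.countP (fun c => c.toNat == v.toNat + 48) :=
      List.countP_congr (fun c _ => by
        simp only [Function.comp_apply]
        rw [char_pred_eq v h0 h9 c])
    rw [hP]
    rw [hK 0 (by omega), hK 1 (by omega), hK 2 (by omega), hK 3 (by omega), hK 4 (by omega),
      hK 5 (by omega), hK 6 (by omega), hK 7 (by omega), hK 8 (by omega), hK 9 (by omega)]
    interval_cases v <;> simp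
  · have hP : (cs.countP fun c =>
        ((fun x => x == v) ∘ fun i => ((i.toNat : Int) - 48)) c
          && decide (c ∈ ['0','1','2','3','4','5','6','7','8','9']))
        = cs.countP (fun _ => false) :=
      List.countP_congr (fun c _ => by
        simp only [Function.comp_apply]
        rw [char_pred_false v hv c])
    rw [hP]
    have hd : ∀ d : Nat, d ≤ 9 → ((d : Int) == v) = false := by
      intro d hd9
      simp only [beq_eq_false_iff_ne, ne_eq]
      omega
    rw [hd 0 (by omega), hd 1 (by omega), hd 2 (by omega), hd 3 (by omega), hd 4 (by omega),
      hd 5 (by omega), hd 6 (by omega), hd 7 (by omega), hd 8 (by omega), hd 9 (by omega)]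
    simp

-- B's output is nondecreasing.
theorem b_pairwise (k : Nat → Nat) (n : Nat) :
    ((List.range n).flatMap (fun d => List.replicate (k d) (d : Int))).Pairwise (· ≤ ·) := by
  induction n with
  | zero => simp
  | succ n ih =>
    rw [List.range_succ, List.flatMap_append]
    refine List.pairwise_append.2 ⟨ih, ?_, ?_⟩
    · simp [List.pairwise_replicate]
    · intro x hx y hy
      obtain ⟨d, hd, hxd⟩ := List.mem_flatMap.1 hx
      rw [List.eq_of_mem_replicate hxd]
      simp only [List.flatMap_cons, List.flatMap_nil, List.append_nil] at hy
      rw [List.eq_of_mem_replicate hy]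
      exact_mod_cast Nat.le_of_lt (List.mem_range.1 hd)

-- ===== VERDICT (by name: the statement is the Claim_ definition above) =====
theorem solution_spec : Claim_equal_solution := by
  intro s _
  show solution s = solution_alt s
  unfold solution solution_alt
  simp only []
  rw [show (fun (acc : List Int) (i : Char) =>
        if i ∈ ['0','1','2','3','4','5','6','7','8','9'] then acc ++ [((i.toNat : Int) - 48)]
        else acc)
      = (fun (acc : List Int) (i : Char) =>
        if decide (i ∈ ['0','1','2','3','4','5','6','7','8','9']) = true then acc ++ [((i.toNat : Int) - 48)]
        else acc) from by funext acc i; split <;> simp_all,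
    PySem.List.foldl_append_if]
  simp only [List.nil_append]
  exact PySem.List.sorted_id_eq_of_perm_of_pairwise _ _ (b_perm_a s.toList) (b_pairwise _ 10)
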